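-- pv_equiv track=rewrite | github.com/neilh44/summon-park-ch | ai_assistant.py | _generate_related_insights
-- ===== SOURCE A (Python) =====
-- from typing import Dict, Any, List, Optional
--
-- def _generate_related_insights(response: str, keywords: List[str]) -> List[str]:
--     """
--     Generate related insights based on response and keywords
--
--     Args:
--         response (str): LLM response
--         keywords (List[str]): Query keywords
--
--     Returns:
--         List of related insight suggestions
--     """
--     related_insight_templates = [
--         "Explore broader context of {keyword}",
--         "Compare {keyword} with alternative perspectives",
--         "Investigate long-term trends in {keyword}"
--     ]
--
--     insights = []
--     for keyword in keywords[:2]:  # Limit to top 2 keywords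
--         for template in related_insight_templates:
--             insights.append(template.format(keyword=keyword.capitalize()))
--
--     return insights[:3]
-- ===== SOURCE B (Python) =====
-- from typing import List
--
-- def _generate_related_insights(response: str, keywords: List[str]) -> List[str]:
--     # Only the first keyword can ever appear in the (3-element) result:
--     # each keyword yields 3 strings and A truncates to 3.
--     if not keywords:
--         return []
--     k = keywords[0].capitalize()
--     return [
--         "Explore broader context of " + k,
--         "Compare " + k + " with alternative perspectives",
--         "Investigate long-term trends in " + k,
--     ]
-- ===== Notes on version B (the rewrite author's own statement) =====
-- stated objective: simpler
-- what changed: B drops the nested keyword/template loops and the final [:3] truncation: since each keyword yields exactly 3 strings, only the first keyword contributes, so B returns the three formatted strings for keywords[0] directly (or [] if empty).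
import Mathlib
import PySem

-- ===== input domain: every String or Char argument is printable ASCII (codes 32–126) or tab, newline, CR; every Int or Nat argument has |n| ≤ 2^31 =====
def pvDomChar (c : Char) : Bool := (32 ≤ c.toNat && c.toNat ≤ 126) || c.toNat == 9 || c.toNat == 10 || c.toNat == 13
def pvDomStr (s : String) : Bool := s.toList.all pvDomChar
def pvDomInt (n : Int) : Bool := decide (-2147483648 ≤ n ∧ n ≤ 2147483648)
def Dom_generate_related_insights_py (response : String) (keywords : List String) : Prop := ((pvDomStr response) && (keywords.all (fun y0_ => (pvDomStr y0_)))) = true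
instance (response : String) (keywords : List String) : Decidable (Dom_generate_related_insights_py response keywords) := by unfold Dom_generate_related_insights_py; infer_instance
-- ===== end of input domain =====

-- B drops the nested keyword/template loops and the [:3] truncation: only the first keyword can contribute.

-- shared helper: Python str.capitalize (exact on ASCII: first char uppercased, rest lowercased)
def pyCapitalize (s : String) : String :=
  match s.toList with
  | [] => ""
  | c :: rest => String.mk (PySem.Chars.upperChar c :: rest.map PySem.Chars.lowerChar)

-- ===== PORT A =====
-- the three templates, applied to an already-capitalized keyword
def pvTemplates : List (String → String) :=
  [ fun k => "Explore broader context of " ++ k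
  , fun k => "Compare " ++ k ++ " with alternative perspectives"
  , fun k => "Investigate long-term trends in " ++ k ]

def generate_related_insights_py (response : String) (keywords : List String) : List String :=
  let insights :=
    (PySem.List.slice keywords none (some 2)).foldl
      (fun acc keyword =>
        pvTemplates.foldl (fun acc2 t => acc2 ++ [t (pyCapitalize keyword)]) acc)
      []
  PySem.List.slice insights none (some 3)

-- ===== PORT B =====
def generate_related_insights_py_alt (response : String) (keywords : List String) : List String :=
  match keywords with
  | [] => []
  | k :: _ =>
    let c := pyCapitalize k
    [ "Explore broader context of " ++ c
    , "Compare " ++ c ++ " with alternative perspectives"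
    , "Investigate long-term trends in " ++ c ]

-- ===== PRECONDITION & SPEC =====
def Spec_generate_related_insights_py (response : String) (keywords : List String) (out : List String) : Prop := out = generate_related_insights_py_alt response keywords
instance (response : String) (keywords : List String) (out : List String) : Decidable (Spec_generate_related_insights_py response keywords out) := by unfold Spec_generate_related_insights_py; infer_instance

-- ===== CLAIM (what is proved, stated in full; the proofs are below) =====
def Claim_equal_generate_related_insights_py : Prop := ∀ (response : String) (keywords : List String), Dom_generate_related_insights_py response keywords → Spec_generate_related_insights_py response keywords (generate_related_insights_py response keywords)

-- ===== LEMMAS AND PROOFS =====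

-- ===== VERDICT (by name: the statement is the Claim_ definition above) =====
theorem generate_related_insights_py_spec : Claim_equal_generate_related_insights_py := by
  intro response keywords _
  unfold Spec_generate_related_insights_py generate_related_insights_py generate_related_insights_py_alt
  match keywords with
  | [] => simp [PySem.List.slice, pvTemplates]
  | [k] => simp [PySem.List.slice, pvTemplates]
  | k :: k2 :: rest => simp [PySem.List.slice, pvTemplates]
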